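-- pv_equiv track=rewrite | github.com/miliar/Code_Jam_Webscraper | solutions_python/solutions_year16_round2_nr2/183.py | repInline
-- ===== SOURCE A (Python) =====
-- def repInline(s, sub):
-- 	s1 = [ch for ch in s]
-- 	sidx = 0
-- 	for idx,ch in enumerate(s):
-- 		if ch == '?':
-- 			s1[idx] = sub[sidx]
-- 			sidx += 1
-- 	return ''.join(s1)
-- ===== SOURCE B (Python) =====
-- def repInline(s, sub):
--     parts = s.split('?')
--     out = [parts[0]]
--     for i in range(len(parts) - 1):
--         out.append(sub[i])
--         out.append(parts[1 + i])
--     return ''.join(out)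
-- ===== Notes on version B (the rewrite author's own statement) =====
-- stated objective: faster
-- what changed: Replaces the per-character scan with index-tracking in-place list assignment by splitting on '?' and interleaving the segments with the substitution characters.
import Mathlib
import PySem

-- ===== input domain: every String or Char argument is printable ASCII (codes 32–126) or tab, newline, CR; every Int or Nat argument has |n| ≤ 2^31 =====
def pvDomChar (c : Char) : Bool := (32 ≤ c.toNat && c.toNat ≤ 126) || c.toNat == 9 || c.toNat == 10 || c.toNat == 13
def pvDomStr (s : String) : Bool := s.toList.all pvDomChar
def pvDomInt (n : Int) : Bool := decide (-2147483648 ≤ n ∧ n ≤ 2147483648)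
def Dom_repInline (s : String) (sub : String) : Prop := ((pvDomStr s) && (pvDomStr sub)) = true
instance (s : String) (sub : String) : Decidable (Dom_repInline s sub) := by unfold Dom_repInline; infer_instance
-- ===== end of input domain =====

-- B rewrites the per-character scan (copy to a list, overwrite each '?' in place from a running
-- sub-index) as split-on-'?' followed by interleaving segments with the substitution characters (idiomatic).

-- ===== PORT A =====
-- literal port of A: copy s to a char list, walk enumerate(s), overwrite position idx when the
-- char is '?' with sub[sidx]; sub[sidx] is pyGet? (none = IndexError, excluded by Pre_; getD is a
-- placeholder never reached inside Pre_).
def repInline (s : String) (sub : String) : String :=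
  let s1 := s.toList
  let st :=
    (PySem.List.enumerate s.toList).foldl
      (fun (st : List Char × Int) (p : Int × Char) =>
        if p.2 = '?' then
          (st.1.set p.1.toNat ((PySem.List.pyGet? sub.toList st.2).getD '?'), st.2 + 1)
        else st)
      (s1, 0)
  String.ofList st.1

-- ===== PORT B =====
-- literal port of Source B: parts = s.split('?'); out = [parts[0]]; for i in range(len(parts)-1):
-- out.append(sub[i]); out.append(parts[1+i]); return ''.join(out).  The getD defaults stand for
-- IndexError (sub too short, excluded by Pre_) and are never reached inside Pre_.
def repInline_alt (s : String) (sub : String) : String :=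
  let parts := PySem.Chars.splitOn s.toList ['?']
  let out :=
    (PySem.List.pyRange 0 ((parts.length : Int) - 1) 1).foldl
      (fun (acc : List (List Char)) (i : Int) =>
        acc ++ [[(PySem.List.pyGet? sub.toList i).getD '?']]
            ++ [(PySem.List.pyGet? parts (1 + i)).getD []])
      [(PySem.List.pyGet? parts 0).getD []]
  String.ofList (PySem.Chars.join [] out)

-- ===== PRECONDITION & SPEC =====
-- Pre_ excludes exactly the inputs where Python A raises IndexError: more '?' in s than len(sub).
def Pre_repInline (s : String) (sub : String) : Prop :=
  s.toList.count '?' ≤ sub.toList.length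
instance (s : String) (sub : String) : Decidable (Pre_repInline s sub) := by
  unfold Pre_repInline; infer_instance
def pvWitness_repInline : String × String := ("a?b?c", "xy")

def Spec_repInline (s : String) (sub : String) (out : String) : Prop := out = repInline_alt s sub
instance (s : String) (sub : String) (out : String) : Decidable (Spec_repInline s sub out) := by unfold Spec_repInline; infer_instance

-- ===== CLAIM (what is proved, stated in full; the proofs are below) =====
def Claim_equal_repInline : Prop := ∀ (s : String) (sub : String), Dom_repInline s sub → Pre_repInline s sub → Spec_repInline s sub (repInline s sub)

-- ===== LEMMAS AND PROOFS =====

-- canonical form: replace each '?' by the next char of u ('?' as never-reached default)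
def pvRep : List Char → List Char → List Char
  | [], _ => []
  | c :: t, u => if c = '?' then u.headD '?' :: pvRep t u.tail else c :: pvRep t u

-- split of l on '?' as (first segment, later segments)
def pvSplit : List Char → List Char × List (List Char)
  | [] => ([], [])
  | c :: t =>
    let p := pvSplit t
    if c = '?' then ([], p.1 :: p.2) else (c :: p.1, p.2)

-- the tail of the interleaving: for each later segment, one char of u then the segment
def pvWeave : List (List Char) → List Char → List Char
  | [], _ => []
  | p :: ps, u => u.headD '?' :: (p ++ pvWeave ps u.tail)

theorem pvSet_append (acc : List Char) (c x : Char) (t : List Char) :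
    (acc ++ c :: t).set acc.length x = acc ++ x :: t := by
  induction acc with
  | nil => rfl
  | cons a as ih => simp [ih]

theorem pvGetD_headD_drop (u : List Char) (j : ℕ) :
    ((PySem.List.pyGet? u (j : Int)).getD '?') = (u.drop j).headD '?' := by
  simp [PySem.List.pyGet?_natCast, List.headD_eq_head?_getD, List.head?_drop]

theorem pvFoldA (sub : List Char) (t : List Char) :
    ∀ (acc : List Char) (j : ℕ),
      ((PySem.List.enumerate t (acc.length : Int)).foldl
        (fun (st : List Char × Int) (p : Int × Char) =>
          if p.2 = '?' then
            (st.1.set p.1.toNat ((PySem.List.pyGet? sub st.2).getD '?'), st.2 + 1)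
          else st)
        (acc ++ t, (j : Int))).1 = acc ++ pvRep t (sub.drop j) := by
  induction t with
  | nil => intro acc j; simp [PySem.List.enumerate_nil, pvRep]
  | cons c t ih =>
    intro acc j
    rw [PySem.List.enumerate_cons]
    by_cases hc : c = '?'
    · subst hc
      have h1 : ((acc ++ '?' :: t).set ((acc.length : Int)).toNat
          ((PySem.List.pyGet? sub (j : Int)).getD '?'))
          = (acc ++ [(sub.drop j).headD '?']) ++ t := by
        rw [pvGetD_headD_drop]
        simpa using pvSet_append acc '?' ((sub.drop j).headD '?') t
      have h2 : ((j : Int) + 1) = ((j + 1 : ℕ) : Int) := by push_cast; ring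
      have h3 : ((acc.length : Int) + 1) = (((acc ++ [(sub.drop j).headD '?']).length : ℕ) : Int) := by
        simp
      simp only [List.foldl_cons, ite_true, h1, h2, h3]
      rw [ih]
      simp [pvRep, ← List.tail_drop]
    · have h3 : ((acc.length : Int) + 1) = (((acc ++ [c]).length : ℕ) : Int) := by
        simp
      simp only [List.foldl_cons, if_neg hc, h3]
      have : acc ++ c :: t = (acc ++ [c]) ++ t := by simp
      rw [this, ih]
      simp [pvRep, hc]

theorem pvA_eq (s sub : String) :
    repInline s sub = String.ofList (pvRep s.toList sub.toList) := by
  unfold repInline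
  have := pvFoldA sub.toList s.toList [] 0
  simpa using congrArg String.ofList this

theorem pvSplitOn_go (t : List Char) :
    ∀ (fuel : ℕ) (cur : List Char) (acc : List (List Char)), t.length < fuel →
      PySem.Chars.splitOn.go ['?'] fuel t cur acc =
        acc.reverse ++ (cur.reverse ++ (pvSplit t).1) :: (pvSplit t).2 := by
  induction t with
  | nil =>
    intro fuel cur acc h
    match fuel, h with
    | fuel + 1, _ => simp [PySem.Chars.splitOn.go, pvSplit]
  | cons c t ih =>
    intro fuel cur acc h
    match fuel, h with
    | fuel + 1, h =>
      by_cases hc : c = '?'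
      · subst hc
        have hpre : List.isPrefixOf ['?'] ('?' :: t) = true := by
          simp [List.isPrefixOf]
        rw [PySem.Chars.splitOn.go]
        simp only [hpre, ite_true]
        rw [show List.drop (['?'] : List Char).length ('?' :: t) = t from rfl]
        rw [ih fuel [] (cur.reverse :: acc) (by simp only [List.length_cons] at h; omega)]
        simp [pvSplit]
      · have hpre : List.isPrefixOf ['?'] (c :: t) = false := by
          have : ¬('?' : Char) = c := fun h => hc h.symm
          simp [List.isPrefixOf, this]
        rw [PySem.Chars.splitOn.go]
        rw [if_neg (by simp [hpre])]
        rw [ih fuel (c :: cur) acc (by simp only [List.length_cons] at h; omega)]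
        simp [pvSplit, hc]

theorem pvSplitOn_eq (l : List Char) :
    PySem.Chars.splitOn l ['?'] = (pvSplit l).1 :: (pvSplit l).2 := by
  unfold PySem.Chars.splitOn
  rw [pvSplitOn_go l (l.length + 1) [] [] (by omega)]
  simp

theorem pvRep_eq_weave (u : List Char) (l : List Char) :
    pvRep l u = (pvSplit l).1 ++ pvWeave (pvSplit l).2 u := by
  induction l generalizing u with
  | nil => simp [pvRep, pvSplit, pvWeave]
  | cons c t ih =>
    by_cases hc : c = '?'
    · simp [pvRep, pvSplit, hc, pvWeave, ih]
    · simp [pvRep, pvSplit, hc, ih]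

theorem pvFoldB (sub : List Char) (p0 : List Char) (rest : List (List Char)) :
    ∀ (j : ℕ) (acc : List (List Char)), j ≤ rest.length →
      ((PySem.List.pyRange (j : Int) ((rest.length : Int)) 1).foldl
        (fun (acc : List (List Char)) (i : Int) =>
          acc ++ [[(PySem.List.pyGet? sub i).getD '?']]
              ++ [(PySem.List.pyGet? (p0 :: rest) (1 + i)).getD []])
        acc).flatten = acc.flatten ++ pvWeave (rest.drop j) (sub.drop j) := by
  intro j acc hj
  induction hrec : rest.length - j generalizing j acc with
  | zero =>
    have hj' : j = rest.length := by omega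
    subst hj'
    rw [PySem.List.pyRange]
    simp [pvWeave, List.drop_length]
  | succ n ih =>
    have hlt : j < rest.length := by omega
    rw [PySem.List.pyRange_one_cons (by exact_mod_cast hlt)]
    rw [List.foldl_cons]
    have h1 : ((PySem.List.pyGet? sub (j : Int)).getD '?') = (sub.drop j).headD '?' :=
      pvGetD_headD_drop sub j
    have h2 : ((PySem.List.pyGet? (p0 :: rest) (1 + (j : Int))).getD []) = (rest.drop j).headD [] := by
      have : (1 + (j : Int)) = ((j + 1 : ℕ) : Int) := by push_cast; ring
      rw [this, PySem.List.pyGet?_natCast]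
      simp [List.headD_eq_head?_getD, List.head?_drop]
    have h3 : ((j : Int) + 1) = ((j + 1 : ℕ) : Int) := by push_cast; ring
    rw [h1, h2, h3, ih (j + 1) _ (by omega) (by omega)]
    obtain ⟨p, ps, hps⟩ : ∃ p ps, rest.drop j = p :: ps :=
      ⟨_, _, (List.drop_eq_getElem_cons hlt)⟩
    have hps' : rest.drop (j + 1) = ps := by
      rw [← List.tail_drop, hps]; rfl
    have hsub : sub.drop (j + 1) = (sub.drop j).tail := by
      rw [← List.tail_drop]
    rw [hps', hsub, hps]
    simp [pvWeave]

theorem pvJoin_nil_flatten (xs : List (List Char)) :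
    PySem.Chars.join [] xs = xs.flatten := by
  induction xs with
  | nil => rfl
  | cons x xs ih =>
    cases xs with
    | nil => simp [PySem.Chars.join, List.intercalate]
    | cons y ys =>
      rw [PySem.Chars.join_cons_cons, ih]
      simp

theorem pvB_eq (s sub : String) :
    repInline_alt s sub = String.ofList (pvRep s.toList sub.toList) := by
  unfold repInline_alt
  rw [pvSplitOn_eq]
  apply congrArg String.ofList
  rw [pvJoin_nil_flatten]
  have h0 : ((PySem.List.pyGet? ((pvSplit s.toList).1 :: (pvSplit s.toList).2) (0 : Int)).getD [])
      = (pvSplit s.toList).1 := by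
    simp [PySem.List.pyGet?, PySem.List.pyIdx?]
  have hlen : ((((pvSplit s.toList).1 :: (pvSplit s.toList).2).length : ℕ) : Int) - 1
      = (((pvSplit s.toList).2.length : ℕ) : Int) := by
    simp
  simp only [h0, hlen]
  have := pvFoldB sub.toList (pvSplit s.toList).1 (pvSplit s.toList).2 0
    [(pvSplit s.toList).1] (Nat.zero_le _)
  simp only [Nat.cast_zero, List.drop_zero] at this
  rw [this]
  simp [pvRep_eq_weave]

-- ===== VERDICT (by name: the statement is the Claim_ definition above) =====
theorem repInline_spec : Claim_equal_repInline := by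
  intro s sub _ _
  unfold Spec_repInline
  rw [pvA_eq, pvB_eq]
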